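-- pv_equiv track=rewrite | github.com/atheler/klang | klang/primes.py | binary_search_with_upper
-- ===== SOURCE A (Python) =====
-- def binary_search_with_upper(array: list, value: int) -> int:
--     """Binary search of value in array but returns next bigger value if there is
--     no match.
--
--     Args:
--         array: Sorted input array to search in.
--         value: Target value to look for.
--
--     Returns:
--         object: Found or next best target value in array.
--
--     Usage:
--         >>> binary_search_with_upper([11, 22, 44], -100)
--         11
--
--         >>> binary_search_with_upper([11, 22, 44], 22)
--         22
--
--         >>> binary_search_with_upper([11, 22, 44], 23)
--         44
--
--         >>> binary_search_with_upper([11, 22, 44], 100)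
--         ValueError
--     """
--     if value > array[-1]:
--         raise ValueError
--
--     lower = 0
--     upper = len(array) - 1
--     while lower <= upper:
--         mid = (lower + upper) // 2
--         if array[mid] == value:
--             return array[mid]
--
--         if array[mid] < value:
--             lower = mid + 1
--         else:
--             upper = mid - 1
--
--     return array[lower]
-- ===== SOURCE B (Python) =====
-- def binary_search_with_upper(array: list, value: int) -> int:
--     """Slice-based divide-and-conquer: same guard, then recursion on a
--     shrinking sub-list (segment) plus an offset instead of index bounds."""
--     if value > array[-1]:
--         raise ValueError
--
--     def rec(seg, offset):
--         if not seg: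
--             return array[offset]
--         m = (len(seg) - 1) // 2
--         x = seg[m]
--         if x == value:
--             return x
--         if x < value:
--             return rec(seg[m + 1:], offset + m + 1)
--         return rec(seg[:m], offset)
--
--     return rec(array, 0)
-- ===== Notes on version B (the rewrite author's own statement) =====
-- stated objective: alternative
-- what changed: Replaces the index-bounds while-loop by divide-and-conquer recursion on shrinking list slices: rec(seg, offset) bisects the segment itself (m = (len(seg)-1)//2) and recurses on seg[m+1:] or seg[:m], rather than tracking lower/upper indices into the full array.
import Mathlib
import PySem

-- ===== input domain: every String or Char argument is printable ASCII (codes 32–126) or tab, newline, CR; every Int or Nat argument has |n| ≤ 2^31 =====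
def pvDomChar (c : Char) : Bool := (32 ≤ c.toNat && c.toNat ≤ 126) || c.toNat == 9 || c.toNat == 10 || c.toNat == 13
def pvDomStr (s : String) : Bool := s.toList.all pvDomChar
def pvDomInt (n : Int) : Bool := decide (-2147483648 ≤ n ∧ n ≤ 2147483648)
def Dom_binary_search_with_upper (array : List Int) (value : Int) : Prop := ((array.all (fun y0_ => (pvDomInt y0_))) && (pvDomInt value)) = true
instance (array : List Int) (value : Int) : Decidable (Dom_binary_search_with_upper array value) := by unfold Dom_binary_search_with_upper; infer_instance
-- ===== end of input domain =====

-- B replaces A's index-bounds while-loop by divide-and-conquer recursion on shrinking list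
-- slices (segment + offset), same cost (alternative decomposition); equivalence on Pre_
-- (= exactly where A returns: nonempty array, value ≤ last element).


-- ===== PORT A =====
-- A's while-loop, state (lower, upper); ported as structural recursion on the Nat fuel
-- array.length, which bounds the iteration count (the interval width drops each turn).
-- pyGetD is safe here: Pre_ excludes the raising inputs.
def pvALoop (array : List Int) (value : Int) : Nat → Int → Int → Int
  | 0, lower, _ => PySem.List.pyGetD array lower 0
  | fuel + 1, lower, upper =>
    if lower ≤ upper then
      let mid := PySem.Int.floordiv (lower + upper) 2
      if PySem.List.pyGetD array mid 0 = value then PySem.List.pyGetD array mid 0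
      else if PySem.List.pyGetD array mid 0 < value then pvALoop array value fuel (mid + 1) upper
      else pvALoop array value fuel lower (mid - 1)
    else PySem.List.pyGetD array lower 0

def binary_search_with_upper (array : List Int) (value : Int) : Int :=
  -- 'raise ValueError' branch (and empty array's IndexError): excluded by Pre_, value irrelevant
  if value > PySem.List.pyGetD array (-1) 0 then 0
  else pvALoop array value array.length 0 ((array.length : Int) - 1)

-- ===== PORT B =====
-- Source B's rec(seg, offset): structural recursion on the segment list. m = (len(seg)-1)//2 is a
-- Nat (seg nonempty), so Python's // is Nat division and the slices seg[m+1:] / seg[:m]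
-- (0 ≤ m < len seg) are exactly List.drop (m+1) / List.take m.
def pvBRec (array : List Int) (value : Int) : List Int → Int → Int
  | [], offset => PySem.List.pyGetD array offset 0
  | h :: t, offset =>
    let seg := h :: t
    let m := (seg.length - 1) / 2
    let x := PySem.List.pyGetD seg (m : Int) 0
    if x = value then x
    else if x < value then pvBRec array value (seg.drop (m + 1)) (offset + (m : Int) + 1)
    else pvBRec array value (seg.take m) offset
  termination_by seg => seg.length
  decreasing_by
    · simp
    · simp; omega

def binary_search_with_upper_alt (array : List Int) (value : Int) : Int :=
  if value > PySem.List.pyGetD array (-1) 0 then 0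
  else pvBRec array value array 0

-- ===== PRECONDITION & SPEC =====
-- Pre_ is exactly where Python A returns: on [] the guard raises IndexError, and with
-- value > array[-1] it raises ValueError; everywhere else A returns (no other raise is reachable).
def Pre_binary_search_with_upper (array : List Int) (value : Int) : Prop :=
  array ≠ [] ∧ value ≤ array.getLastD 0
instance (array : List Int) (value : Int) : Decidable (Pre_binary_search_with_upper array value) := by unfold Pre_binary_search_with_upper; infer_instance
def pvWitness_binary_search_with_upper : List Int × Int := ([11, 22, 44], 23)

def Spec_binary_search_with_upper (array : List Int) (value : Int) (out : Int) : Prop := out = binary_search_with_upper_alt array value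
instance (array : List Int) (value : Int) (out : Int) : Decidable (Spec_binary_search_with_upper array value out) := by unfold Spec_binary_search_with_upper; infer_instance

-- ===== CLAIM (what is proved, stated in full; the proofs are below) =====
def Claim_equal_binary_search_with_upper : Prop := ∀ (array : List Int) (value : Int), Dom_binary_search_with_upper array value → Pre_binary_search_with_upper array value → Spec_binary_search_with_upper array value (binary_search_with_upper array value)

-- ===== LEMMAS AND PROOFS =====
-- A's loop on bounds (lower, upper) equals B's recursion on the slice array[lower..upper]
theorem pvALoop_eq_pvBRec (array : List Int) (value : Int) :
    ∀ (fuel : Nat) (lower upper : Int), 0 ≤ lower → upper < array.length →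
      (upper + 1 - lower).toNat ≤ fuel →
      pvALoop array value fuel lower upper =
        pvBRec array value ((array.drop lower.toNat).take (upper + 1 - lower).toNat) lower := by
  intro fuel
  induction fuel with
  | zero =>
    intro lower upper h0 hu hw
    have hz : (upper + 1 - lower).toNat = 0 := by omega
    rw [hz]
    simp [pvALoop, pvBRec]
  | succ fuel ih =>
    intro lower upper h0 hu hw
    by_cases hlu : lower ≤ upper
    · have hw1 : 1 ≤ (upper + 1 - lower).toNat := by omega
      have hle : lower.toNat + (upper + 1 - lower).toNat ≤ array.length := by omega
      have hseglen : ((array.drop lower.toNat).take (upper + 1 - lower).toNat).length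
          = (upper + 1 - lower).toNat := by
        simp; omega
      have hmid : PySem.Int.floordiv (lower + upper) 2
          = lower + ((((upper + 1 - lower).toNat - 1) / 2 : Nat) : Int) := by
        rw [PySem.Int.floordiv_eq_ediv_of_pos (by omega)]
        omega
      have hm : (((upper + 1 - lower).toNat - 1) / 2) < (upper + 1 - lower).toNat := by omega
      have hget : PySem.List.pyGetD ((array.drop lower.toNat).take (upper + 1 - lower).toNat)
            (((((upper + 1 - lower).toNat - 1) / 2 : Nat)) : Int) 0
          = PySem.List.pyGetD array (PySem.Int.floordiv (lower + upper) 2) 0 := by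
        rw [hmid, PySem.List.pyGetD_natCast,
          PySem.List.pyGetD_eq_getElem _ _ (by omega) (by omega),
          List.getD_eq_getElem _ _ (by omega)]
        simp
        congr 1
        omega
      obtain ⟨a, t, hc⟩ : ∃ a t,
          (array.drop lower.toNat).take (upper + 1 - lower).toNat = a :: t := by
        cases hx : (array.drop lower.toNat).take (upper + 1 - lower).toNat with
        | nil => rw [hx] at hseglen; simp at hseglen; omega
        | cons a t => exact ⟨a, t, rfl⟩
      have ht : t.length + 1 = (upper + 1 - lower).toNat := by
        rw [hc] at hseglen; simpa using hseglen
      rw [hc] at hget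
      have hm2 : ((upper + 1 - lower).toNat - 1) / 2 = t.length / 2 := by omega
      rw [hm2] at hget hmid hm
      rw [hc]
      simp only [pvALoop, pvBRec, if_pos hlu, List.length_cons, Nat.add_sub_cancel]
      rw [hget]
      rw [hmid]
      split_ifs with h1 h2
      · rfl
      · rw [ih (lower + ((t.length / 2 : Nat) : Int) + 1) upper (by omega) hu (by omega)]
        congr 1
        · rw [← hc, List.drop_take, List.drop_drop]
          congr 1
          · omega
          · congr 1
            omega
      · rw [ih lower (lower + ((t.length / 2 : Nat) : Int) - 1) h0 (by omega) (by omega)]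
        congr 1
        rw [← hc, List.take_take]
        congr 1
        omega
    · have hz : (upper + 1 - lower).toNat = 0 := by omega
      rw [hz]
      simp [pvALoop, pvBRec, hlu]

-- ===== VERDICT (by name: the statement is the Claim_ definition above) =====
theorem binary_search_with_upper_spec : Claim_equal_binary_search_with_upper := by
  intro array value _ hpre
  unfold Spec_binary_search_with_upper binary_search_with_upper binary_search_with_upper_alt
  have hne : array ≠ [] := hpre.1
  have hlen : 0 < array.length := List.length_pos_iff.mpr hne
  rw [pvALoop_eq_pvBRec array value array.length 0 ((array.length : Int) - 1) le_rfl (by omega)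
    (by omega)]
  simp
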